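-- pv_equiv track=rewrite | github.com/Pritz69/GFG_POTD | Difficulty: Easy/Modify the Array/modify-the-array.py | modifyAndRearrangeArr
-- ===== SOURCE A (Python) =====
-- def modifyAndRearrangeArr (arr) :
--     #Complete the function
--     narr=[]
--     i=0
--     n=len(arr)
--     while i < n :
--         if i+1<n and arr[i]==arr[i+1] and arr[i] > 0 :
--             narr.append(arr[i]*2)
--             i +=1
--         elif arr[i] > 0 :
--             narr.append(arr[i])
--         i +=1
--     for i in range(len(arr)-len(narr)) :
--         narr.append(0)
--     return narr
-- ===== SOURCE B (Python) =====
-- def modifyAndRearrangeArr(arr):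
--     # phase 1: merge adjacent equal positive pairs into their double
--     merged = []
--     i = 0
--     n = len(arr)
--     while i < n:
--         if i + 1 < n and arr[i] == arr[i + 1] and arr[i] > 0:
--             merged.append(arr[i] * 2)
--             i += 2
--         else:
--             merged.append(arr[i])
--             i += 1
--     # phase 2: keep only strictly positive values
--     result = [x for x in merged if x > 0]
--     # phase 3: pad with zeros to the original length
--     result.extend([0] * (n - len(result)))
--     return result
-- ===== Notes on version B (the rewrite author's own statement) =====
-- stated objective: simpler
-- what changed: A interleaves merging, positivity filtering and zero-padding in one stateful pass; B decomposes the task into three sequential phases: a pure merge pass (emitting every element, doubling matched positive pairs), a positivity filter comprehension, and a zero-padding extend.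
import Mathlib
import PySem

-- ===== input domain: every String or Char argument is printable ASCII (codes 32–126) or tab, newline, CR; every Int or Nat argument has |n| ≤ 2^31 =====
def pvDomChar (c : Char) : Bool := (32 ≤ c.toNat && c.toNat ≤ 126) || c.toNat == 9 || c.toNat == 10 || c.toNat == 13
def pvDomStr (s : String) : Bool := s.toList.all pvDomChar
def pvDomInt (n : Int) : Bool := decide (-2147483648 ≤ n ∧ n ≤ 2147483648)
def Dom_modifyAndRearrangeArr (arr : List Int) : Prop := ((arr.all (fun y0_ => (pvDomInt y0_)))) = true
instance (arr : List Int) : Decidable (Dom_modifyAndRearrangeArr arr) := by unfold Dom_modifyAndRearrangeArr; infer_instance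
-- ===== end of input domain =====

-- B replaces A's single interleaved merge+filter+pad pass by three sequential phases (merge, filter, pad) for clarity.


-- ===== PORT A =====
-- A's while loop over index i; arr[i] read with getD (exact: i is always 0 ≤ i < n at every read).
def pvALoop (arr : List Int) (n i : Nat) (narr : List Int) : List Int :=
  if _ : i < n then
    if i + 1 < n ∧ arr.getD i 0 = arr.getD (i+1) 0 ∧ arr.getD i 0 > 0 then
      pvALoop arr n (i + 2) (narr ++ [arr.getD i 0 * 2])
    else if arr.getD i 0 > 0 then
      pvALoop arr n (i + 1) (narr ++ [arr.getD i 0])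
    else
      pvALoop arr n (i + 1) narr
  else narr
termination_by n - i

def modifyAndRearrangeArr (arr : List Int) : List Int :=
  let narr := pvALoop arr arr.length 0 []
  narr ++ List.replicate (arr.length - narr.length) 0

-- ===== PORT B =====
-- phase 1 of Source B: merge adjacent equal positive pairs
def pvMerge : List Int → List Int
  | [] => []
  | [x] => [x]
  | x :: y :: rest =>
    if x = y ∧ x > 0 then (x * 2) :: pvMerge rest
    else x :: pvMerge (y :: rest)

def modifyAndRearrangeArr_alt (arr : List Int) : List Int :=
  let merged := pvMerge arr
  let result := merged.filter (fun x => x > 0)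
  result ++ List.replicate (arr.length - result.length) 0

-- ===== PRECONDITION & SPEC =====
def Spec_modifyAndRearrangeArr (arr : List Int) (out : List Int) : Prop := out = modifyAndRearrangeArr_alt arr
instance (arr : List Int) (out : List Int) : Decidable (Spec_modifyAndRearrangeArr arr out) := by unfold Spec_modifyAndRearrangeArr; infer_instance

-- ===== CLAIM (what is proved, stated in full; the proofs are below) =====
def Claim_equal_modifyAndRearrangeArr : Prop := ∀ (arr : List Int), Dom_modifyAndRearrangeArr arr → Spec_modifyAndRearrangeArr arr (modifyAndRearrangeArr arr)

-- ===== LEMMAS AND PROOFS =====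

-- A's loop from index i computes narr ++ (filtered merge of the suffix arr.drop i)
theorem pvALoop_eq_aux (arr : List Int) (k : Nat) :
    ∀ (i : Nat) (narr : List Int), arr.length - i ≤ k →
    pvALoop arr arr.length i narr = narr ++ (pvMerge (arr.drop i)).filter (fun x => x > 0) := by
  induction k with
  | zero =>
    intro i narr hk
    have hi : ¬ i < arr.length := by omega
    have hd : arr.drop i = [] := List.drop_eq_nil_of_le (by omega)
    rw [pvALoop, dif_neg hi, hd]
    simp [pvMerge]
  | succ k ih =>
    intro i narr hk
    by_cases hi : i < arr.length
    case neg =>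
      have hd : arr.drop i = [] := List.drop_eq_nil_of_le (by omega)
      rw [pvALoop, dif_neg hi, hd]
      simp [pvMerge]
    case pos =>
    rw [pvALoop, dif_pos hi]
    have hdrop : arr.drop i = arr[i] :: arr.drop (i+1) := List.drop_eq_getElem_cons hi
    have hgi : arr.getD i 0 = arr[i] := List.getD_eq_getElem arr 0 hi
    by_cases h1 : i + 1 < arr.length
    · have hdrop1 : arr.drop (i+1) = arr[i+1] :: arr.drop (i+2) := List.drop_eq_getElem_cons h1
      have hg1 : arr.getD (i+1) 0 = arr[i+1] := List.getD_eq_getElem arr 0 h1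
      by_cases h2 : arr[i] = arr[i+1] ∧ arr[i] > 0
      · rw [if_pos (by rw [hgi, hg1]; exact ⟨h1, h2.1, h2.2⟩)]
        rw [ih (i+2) _ (by omega)]
        rw [hdrop, hdrop1, pvMerge, if_pos h2]
        rw [List.filter_cons_of_pos (by simp; omega)]
        simp [List.getElem?_eq_getElem hi]
      · rw [if_neg (by rw [hgi, hg1]; tauto)]
        have hmerge : pvMerge (arr.drop i) = arr[i] :: pvMerge (arr.drop (i+1)) := by
          rw [hdrop, hdrop1, pvMerge, if_neg h2, ← hdrop1]
        by_cases h3 : arr[i] > 0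
        · rw [if_pos (by rw [hgi]; exact h3)]
          rw [ih (i+1) _ (by omega), hmerge]
          rw [List.filter_cons_of_pos (by simpa using h3)]
          simp [List.getElem?_eq_getElem hi]
        · rw [if_neg (by rw [hgi]; exact h3)]
          rw [ih (i+1) _ (by omega), hmerge]
          rw [List.filter_cons_of_neg (by simpa using h3)]
    · have hdrop1 : arr.drop (i+1) = [] := List.drop_eq_nil_of_le (by omega)
      have hmerge : pvMerge (arr.drop i) = [arr[i]] := by
        rw [hdrop, hdrop1, pvMerge]
      rw [if_neg (by tauto)]
      by_cases h3 : arr[i] > 0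
      · rw [if_pos (by rw [hgi]; exact h3)]
        rw [ih (i+1) _ (by omega), hdrop1]
        rw [hmerge, List.filter_cons_of_pos (by simpa using h3)]
        simp [pvMerge, List.getElem?_eq_getElem hi]
      · rw [if_neg (by rw [hgi]; exact h3)]
        rw [ih (i+1) _ (by omega), hdrop1]
        rw [hmerge, List.filter_cons_of_neg (by simpa using h3)]
        simp [pvMerge]

theorem pvALoop_eq (arr : List Int) (i : Nat) (narr : List Int) :
    pvALoop arr arr.length i narr = narr ++ (pvMerge (arr.drop i)).filter (fun x => x > 0) :=
  pvALoop_eq_aux arr arr.length i narr (by omega)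

-- ===== VERDICT (by name: the statement is the Claim_ definition above) =====
theorem modifyAndRearrangeArr_spec : Claim_equal_modifyAndRearrangeArr := by
  intro arr _
  unfold Spec_modifyAndRearrangeArr modifyAndRearrangeArr modifyAndRearrangeArr_alt
  simp only [pvALoop_eq arr 0 [], List.drop_zero, List.nil_append]
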